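-- pv_equiv track=rewrite | github.com/Anouchka-M/Modules-d-exercices-FunMooc-Apprendre-coder-avec-Python | Module5_Les_séquences_de_données/3.Méthodes_de_manipulation/UpyLaB 5.15.py | distance_mots
-- ===== SOURCE A (Python) =====
-- def distance_mots(mot_1, mot_2):
--     indice = 0
--     distance = 0
--
--     while indice < len(mot_1) and indice < len(mot_2):
--         if mot_1[indice] != mot_2[indice]:
--             distance += 1
--         indice += 1
--     #return distance + len(mot_1) - len(mot_2) if len(mot_1) >= len(mot_2) else distance + len(mot_2) - len(mot_1)
--     return distance + abs(len(mot_1) - len(mot_2))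
-- ===== SOURCE B (Python) =====
-- def distance_mots(mot_1, mot_2):
--     # Divide and conquer: split both words at the midpoint of the shared
--     # prefix and add the distances of the two halves; when one word is
--     # exhausted, the remaining letters of the other each count 1.
--     n = min(len(mot_1), len(mot_2))
--     if n == 0:
--         return max(len(mot_1), len(mot_2))
--     if n == 1:
--         return (mot_1[0] != mot_2[0]) + distance_mots(mot_1[1:], mot_2[1:])
--     k = n // 2
--     return distance_mots(mot_1[:k], mot_2[:k]) + distance_mots(mot_1[k:], mot_2[k:])
-- ===== Notes on version B (the rewrite author's own statement) =====
-- stated objective: alternative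
-- what changed: Replaces the linear while loop plus abs(length difference) with a divide-and-conquer recursion that splits both words at the midpoint of the shared prefix and sums the two half-distances, the length difference emerging from the base case instead of an abs computation.
import Mathlib
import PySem

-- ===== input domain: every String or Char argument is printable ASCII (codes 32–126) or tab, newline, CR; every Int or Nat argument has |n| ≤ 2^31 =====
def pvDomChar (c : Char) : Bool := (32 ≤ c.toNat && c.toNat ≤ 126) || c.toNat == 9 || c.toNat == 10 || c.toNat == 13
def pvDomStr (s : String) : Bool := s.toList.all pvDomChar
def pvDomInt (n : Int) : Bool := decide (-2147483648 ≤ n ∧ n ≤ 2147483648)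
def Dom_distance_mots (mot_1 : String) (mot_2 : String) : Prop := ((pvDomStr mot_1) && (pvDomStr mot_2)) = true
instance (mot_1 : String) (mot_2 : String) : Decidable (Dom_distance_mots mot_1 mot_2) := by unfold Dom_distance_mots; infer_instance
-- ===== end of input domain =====

-- B replaces A's while loop + abs(length difference) by a divide-and-conquer recursion
-- splitting both words at the midpoint of the shared prefix (alternative decomposition).

-- ===== PORT A =====
-- the while loop over the common prefix, counting mismatching positions
def pvLoopA : List Char → List Char → Int
  | a :: as, b :: bs => (if a ≠ b then (1 : Int) else 0) + pvLoopA as bs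
  | _, _ => 0

def distance_mots (mot_1 : String) (mot_2 : String) : Int :=
  pvLoopA mot_1.toList mot_2.toList
    + |(mot_1.toList.length : Int) - (mot_2.toList.length : Int)|

-- ===== PORT B =====
-- divide and conquer on both words; base cases: one word exhausted, or shared prefix of length 1
def pvDnC : List Char → List Char → Int
  | xs, ys =>
    if min xs.length ys.length = 0 then (max xs.length ys.length : Int)
    else if min xs.length ys.length = 1 then
      (if xs.headI ≠ ys.headI then (1 : Int) else 0) + pvDnC xs.tail ys.tail
    else
      let k := min xs.length ys.length / 2
      pvDnC (xs.take k) (ys.take k) + pvDnC (xs.drop k) (ys.drop k)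
termination_by xs ys => xs.length + ys.length
decreasing_by
  · simp only [List.length_tail]; omega
  · simp only [List.length_take]; omega
  · simp only [List.length_drop]; omega

def distance_mots_alt (mot_1 : String) (mot_2 : String) : Int :=
  pvDnC mot_1.toList mot_2.toList

-- ===== PRECONDITION & SPEC =====
def Spec_distance_mots (mot_1 : String) (mot_2 : String) (out : Int) : Prop := out = distance_mots_alt mot_1 mot_2
instance (mot_1 : String) (mot_2 : String) (out : Int) : Decidable (Spec_distance_mots mot_1 mot_2 out) := by unfold Spec_distance_mots; infer_instance

-- ===== CLAIM (what is proved, stated in full; the proofs are below) =====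
def Claim_equal_distance_mots : Prop := ∀ (mot_1 : String) (mot_2 : String), Dom_distance_mots mot_1 mot_2 → Spec_distance_mots mot_1 mot_2 (distance_mots mot_1 mot_2)

-- ===== LEMMAS AND PROOFS =====
-- A's mismatch count is additive across a split at the same position of both words
lemma pvLoopA_append (xs ys us vs : List Char) (h : xs.length = ys.length) :
    pvLoopA (xs ++ us) (ys ++ vs) = pvLoopA xs ys + pvLoopA us vs := by
  induction xs generalizing ys with
  | nil => cases ys with
    | nil => simp [pvLoopA]
    | cons b bs => simp at h
  | cons a as ih =>
    cases ys with
    | nil => simp at h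
    | cons b bs =>
      simp only [List.cons_append, pvLoopA]
      rw [ih bs (by simpa using h)]
      ring

lemma pv_key (xs ys : List Char) :
    pvDnC xs ys = pvLoopA xs ys + |(xs.length : Int) - ys.length| := by
  induction xs, ys using pvDnC.induct with
  | case1 xs ys h0 =>
    rw [pvDnC, if_pos h0]
    rcases Nat.min_eq_zero_iff.mp h0 with h | h
    · rw [List.length_eq_zero_iff.mp h]
      simp only [pvLoopA, List.length_nil, Nat.cast_zero, zero_add]
      rw [abs_of_nonpos (by push_cast; omega)]
      push_cast; omega
    · rw [List.length_eq_zero_iff.mp h]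
      cases xs with
      | nil => simp [pvLoopA]
      | cons a as =>
        simp only [pvLoopA, List.length_nil, List.length_cons, Nat.cast_zero, zero_add]
        rw [abs_of_nonneg (by push_cast; omega)]
        push_cast; omega
  | case2 xs ys h0 h1 ih =>
    rw [pvDnC, if_neg h0, if_pos h1]
    cases xs with
    | nil => exfalso; simp at h0
    | cons a as =>
      cases ys with
      | nil => exfalso; simp at h0
      | cons b bs =>
        simp only [List.headI, List.tail_cons] at *
        rw [ih]
        simp only [pvLoopA, List.length_cons]
        push_cast
        by_cases hab : a = b <;> simp [hab] <;> ring_nf <;> omega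
  | case3 xs ys h0 h1 k ih1 ih2 =>
    rw [pvDnC, if_neg h0, if_neg h1]
    show pvDnC (xs.take k) (ys.take k) + pvDnC (xs.drop k) (ys.drop k) = _
    have hk : k = min xs.length ys.length / 2 := rfl
    have hkx : k ≤ xs.length := by omega
    have hky : k ≤ ys.length := by omega
    rw [ih1, ih2]
    have hsplit : pvLoopA xs ys
        = pvLoopA (xs.take k) (ys.take k) + pvLoopA (xs.drop k) (ys.drop k) := by
      conv_lhs => rw [← List.take_append_drop k xs, ← List.take_append_drop k ys]
      exact pvLoopA_append _ _ _ _ (by simp [List.length_take]; omega)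
    rw [hsplit]
    have e1 : (xs.take k).length = k := by simp [List.length_take]; omega
    have e2 : (ys.take k).length = k := by simp [List.length_take]; omega
    have e3 : (xs.drop k).length = xs.length - k := by simp [List.length_drop]
    have e4 : (ys.drop k).length = ys.length - k := by simp [List.length_drop]
    rw [e1, e2, e3, e4]
    rw [show ((k:Int) - k) = 0 by ring, abs_zero]
    rw [show ((xs.length - k : Nat) : Int) = (xs.length : Int) - k by omega,
        show ((ys.length - k : Nat) : Int) = (ys.length : Int) - k by omega,
        show (xs.length : Int) - k - ((ys.length : Int) - k) = (xs.length : Int) - ys.length by ring]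
    ring

-- ===== VERDICT (by name: the statement is the Claim_ definition above) =====
theorem distance_mots_spec : Claim_equal_distance_mots := by
  intro m1 m2 _
  unfold Spec_distance_mots distance_mots distance_mots_alt
  rw [pv_key]
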